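-- pv_equiv track=rewrite | github.com/CSCI4850/s21-team2-project | prototyping/models/castlevania/lstm/lstm.py | parse_string_to_chord
-- ===== SOURCE A (Python) =====
-- def parse_string_to_chord(concatenated_chord):
--     """Convert a concatenated chord to list of notes for music21 chord.
--
--     :param concatenated_chord: <class 'str'>  A concatenated string
--         representing a string.
--     :return: <class 'list'> A list of strings representing a chord
--         for music21
--     """
--     chord = []
--     slice_from = 0
--     for ix, char in enumerate(concatenated_chord):
--         if char.isdigit():
--             chord.append(concatenated_chord[slice_from:ix + 1])
--             slice_from = ix + 1
--
--     # Return list of notes (a chord)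
--     return chord
-- ===== SOURCE B (Python) =====
-- import re
--
-- _DIGIT = re.compile(r'([0-9])')
--
-- def parse_string_to_chord(concatenated_chord):
--     """Convert a concatenated chord to list of notes for music21 chord."""
--     # split keeps the captured digit separators: chunk, digit, chunk, digit, ..., tail
--     parts = _DIGIT.split(concatenated_chord)
--     it = iter(parts)
--     return [chunk + digit for chunk, digit in zip(it, it)]
-- ===== Notes on version B (the rewrite author's own statement) =====
-- stated objective: faster
-- what changed: replaces the explicit enumerate/cursor/slice loop by one re.split on a captured single-digit group followed by pairing each non-digit chunk with its terminating digit via zip over one iterator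
import Mathlib
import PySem

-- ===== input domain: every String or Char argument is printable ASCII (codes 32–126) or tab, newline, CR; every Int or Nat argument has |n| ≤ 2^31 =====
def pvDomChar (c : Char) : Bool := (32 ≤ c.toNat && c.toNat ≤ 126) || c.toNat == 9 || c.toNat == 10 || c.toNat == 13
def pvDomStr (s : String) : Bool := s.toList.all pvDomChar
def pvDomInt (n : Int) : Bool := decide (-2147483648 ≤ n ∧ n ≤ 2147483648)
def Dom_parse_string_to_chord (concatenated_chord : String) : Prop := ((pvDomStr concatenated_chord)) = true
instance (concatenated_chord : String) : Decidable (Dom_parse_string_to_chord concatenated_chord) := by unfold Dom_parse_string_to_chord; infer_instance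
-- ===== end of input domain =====

-- B replaces A's explicit cursor/slice loop by re.split on a captured digit plus pairing; a timing run measured it faster at large sizes.

-- ===== PORT A =====
-- for ix, char in enumerate(s): if char.isdigit(): chord.append(s[slice_from:ix+1]); slice_from = ix+1
def parse_string_to_chord (concatenated_chord : String) : List String :=
  (((PySem.List.enumerate concatenated_chord.toList 0).foldl
      (fun (st : List String × Int) (p : Int × Char) =>
        if PySem.Chars.isdigit p.2 then
          (st.1 ++ [PySem.Str.slice concatenated_chord (some st.2) (some (p.1 + 1))], p.1 + 1)
        else st)
      ([], 0)) : List String × Int).1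

-- ===== PORT B =====
-- re.split(r'([0-9])', s): alternating non-digit chunks and captured single digits, ending with the tail chunk
def pvSplitCapture (cs : List Char) : List (List Char) :=
  match h : cs.dropWhile (fun c => !('0' ≤ c && c ≤ '9')) with
  | [] => [cs.takeWhile (fun c => !('0' ≤ c && c ≤ '9'))]
  | d :: rest =>
      cs.takeWhile (fun c => !('0' ≤ c && c ≤ '9')) :: [d] :: pvSplitCapture rest
termination_by cs.length
decreasing_by
  have h1 : (cs.dropWhile (fun c => !('0' ≤ c && c ≤ '9'))).length ≤ cs.length :=
    (List.dropWhile_sublist _).length_le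
  rw [h] at h1
  simp at h1
  omega

-- zip(it, it) on iter(parts): consecutive disjoint pairs, an unpaired trailing element is dropped
def pvPairUp : List (List Char) → List (List Char × List Char)
  | a :: b :: rest => (a, b) :: pvPairUp rest
  | _ => []

def parse_string_to_chord_alt (concatenated_chord : String) : List String :=
  (pvPairUp (pvSplitCapture concatenated_chord.toList)).map
    (fun ab => String.ofList (ab.1 ++ ab.2))

-- ===== PRECONDITION & SPEC =====
def Spec_parse_string_to_chord (concatenated_chord : String) (out : List String) : Prop := out = parse_string_to_chord_alt concatenated_chord
instance (concatenated_chord : String) (out : List String) : Decidable (Spec_parse_string_to_chord concatenated_chord out) := by unfold Spec_parse_string_to_chord; infer_instance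

-- ===== CLAIM (what is proved, stated in full; the proofs are below) =====
def Claim_equal_parse_string_to_chord : Prop := ∀ (concatenated_chord : String), Dom_parse_string_to_chord concatenated_chord → Spec_parse_string_to_chord concatenated_chord (parse_string_to_chord concatenated_chord)

-- ===== LEMMAS AND PROOFS =====

-- A's loop step
def pvStepA (s : String) (st : List String × Int) (p : Int × Char) : List String × Int :=
  if PySem.Chars.isdigit p.2 then
    (st.1 ++ [PySem.Str.slice s (some st.2) (some (p.1 + 1))], p.1 + 1)
  else st

-- the common token list both programs produce, as a proof-side characterisation
def pvFindall (cs : List Char) : List (List Char) :=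
  match h : cs.dropWhile (fun c => !('0' ≤ c && c ≤ '9')) with
  | [] => []
  | d :: rest =>
      (cs.takeWhile (fun c => !('0' ≤ c && c ≤ '9')) ++ [d]) :: pvFindall rest
termination_by cs.length
decreasing_by
  have h1 : (cs.dropWhile (fun c => !('0' ≤ c && c ≤ '9'))).length ≤ cs.length :=
    (List.dropWhile_sublist _).length_le
  rw [h] at h1
  simp at h1
  omega

-- a run of non-digits leaves A's state untouched
theorem pvFold_nondigit (s : String) (tw : List Char)
    (h : ∀ c ∈ tw, PySem.Chars.isdigit c = false) :
    ∀ (u : List Char) (m : Int) (st : List String × Int),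
      (PySem.List.enumerate (tw ++ u) m).foldl (pvStepA s) st
        = (PySem.List.enumerate u (m + tw.length)).foldl (pvStepA s) st := by
  induction tw with
  | nil => intro u m st; simp
  | cons c tw ih =>
    intro u m st
    have hc : pvStepA s st (m, c) = st := by simp [pvStepA, h c (by simp)]
    simp only [List.cons_append, PySem.List.enumerate_cons, List.foldl_cons]
    rw [hc, ih (fun d hd => h d (by simp [hd])) u (m + 1) st]
    congr 1
    congr 1
    simp only [List.length_cons]
    push_cast
    ring

-- pvFindall, unfolded at a digit position
theorem pvFindall_cons (t : List Char) (d : Char) (rest : List Char)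
    (ht : t.dropWhile (fun c => !('0' ≤ c && c ≤ '9')) = d :: rest) :
    pvFindall t = (t.takeWhile (fun c => !('0' ≤ c && c ≤ '9')) ++ [d]) :: pvFindall rest := by
  rw [pvFindall]
  split
  · next heq => rw [ht] at heq; cases heq
  · next d' rest' heq => rw [ht] at heq; cases heq; rfl

-- pvSplitCapture, unfolded at a digit position
theorem pvSplitCapture_cons (t : List Char) (d : Char) (rest : List Char)
    (ht : t.dropWhile (fun c => !('0' ≤ c && c ≤ '9')) = d :: rest) :
    pvSplitCapture t
      = t.takeWhile (fun c => !('0' ≤ c && c ≤ '9')) :: [d] :: pvSplitCapture rest := by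
  rw [pvSplitCapture]
  split
  · next heq => rw [ht] at heq; cases heq
  · next d' rest' heq => rw [ht] at heq; cases heq; rfl

-- B's split-and-pair produces exactly the pvFindall tokens
theorem pvPair_split (cs : List Char) :
    (pvPairUp (pvSplitCapture cs)).map (fun ab => ab.1 ++ ab.2) = pvFindall cs := by
  induction cs using pvFindall.induct with
  | case1 t ht =>
    rw [pvSplitCapture, pvFindall]
    split
    · next heq => simp [pvPairUp]
    · next d' rest' heq => rw [ht] at heq; cases heq
  | case2 t d rest ht ih =>
    rw [pvSplitCapture_cons t d rest ht, pvFindall_cons t d rest ht]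
    simp only [pvPairUp, List.map_cons, ih]

-- main invariant: A's fold over the suffix t starting at index/cursor |pre| appends the pvFindall tokens
theorem pvMain (s : String) :
    ∀ (t pre : List Char) (acc : List String),
      s.toList = pre ++ t →
      ((PySem.List.enumerate t (pre.length : Int)).foldl (pvStepA s) (acc, (pre.length : Int))).1
        = acc ++ (pvFindall t).map String.ofList := by
  intro t
  induction t using pvFindall.induct with
  | case1 t ht =>
    intro pre acc hs
    have hall : ∀ c ∈ t, PySem.Chars.isdigit c = false := by
      intro c hc
      have h1 := List.dropWhile_eq_nil_iff.mp ht c hc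
      simp only [PySem.Chars.isdigit]
      simp at h1 ⊢
      intro h0
      cases h1 with
      | inl h => exact absurd h0 (not_le.mpr h)
      | inr h => exact h
    have h2 := pvFold_nondigit s t hall [] (pre.length : Int) (acc, (pre.length : Int))
    simp only [List.append_nil] at h2
    rw [h2]
    rw [pvFindall, ht]
    simp
  | case2 t d rest ht ih =>
    intro pre acc hs
    set p : Char → Bool := fun c => !('0' ≤ c && c ≤ '9') with hp
    set tw : List Char := t.takeWhile p with htwdef
    have hsplit : tw ++ d :: rest = t := by
      conv_rhs => rw [← List.takeWhile_append_dropWhile (p := p) (l := t)]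
      rw [ht]
    have htw : ∀ c ∈ tw, PySem.Chars.isdigit c = false := by
      intro c hc
      have h1 := List.mem_takeWhile_imp hc
      simp only [hp] at h1
      simp only [PySem.Chars.isdigit]
      simp at h1 ⊢
      intro h0
      cases h1 with
      | inl h => exact absurd h0 (not_le.mpr h)
      | inr h => exact h
    have hd : PySem.Chars.isdigit d = true := by
      have h1 := List.head?_dropWhile_not p t
      rw [ht] at h1
      simpa [PySem.Chars.isdigit, hp] using h1
    have hs' : s.toList = pre ++ (tw ++ d :: rest) := by rw [hs, hsplit]
    -- the token A slices out is exactly the match tw ++ [d]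
    have htok : PySem.Str.slice s (some (pre.length : Int))
        (some ((pre.length : Int) + (tw.length : Int) + 1))
        = String.ofList (tw ++ [d]) := by
      have h1 : ((pre.length : Int) + (tw.length : Int) + 1)
          = ((pre.length + (tw.length + 1) : Nat) : Int) := by push_cast; ring
      have h2 : (PySem.Str.slice s (some (pre.length : Int))
          (some ((pre.length : Int) + (tw.length : Int) + 1))).toList = tw ++ [d] := by
        rw [h1]
        simp only [PySem.Str.toList_slice, PySem.Chars.slice_eq_listSlice,
          PySem.List.slice_natCast]
        rw [hs', List.drop_left, Nat.add_sub_cancel_left, List.take_append]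
        simp
      rw [← h2, String.ofList_toList]
    have hstep : pvStepA s (acc, (pre.length : Int))
        ((pre.length : Int) + (tw.length : Int), d)
        = (acc ++ [String.ofList (tw ++ [d])],
           (pre.length : Int) + (tw.length : Int) + 1) := by
      simp [pvStepA, hd, htok]
    rw [pvFindall_cons t d rest ht, ← htwdef]
    conv_lhs => rw [← hsplit]
    rw [pvFold_nondigit s tw htw (d :: rest) (pre.length : Int) (acc, (pre.length : Int))]
    simp only [PySem.List.enumerate_cons, List.foldl_cons]
    rw [hstep]
    have hlen : (pre.length : Int) + (tw.length : Int) + 1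
        = (((pre ++ tw ++ [d]).length : Nat) : Int) := by simp; ring
    rw [hlen]
    have hpre' : s.toList = (pre ++ tw ++ [d]) ++ rest := by rw [hs']; simp
    rw [ih (pre ++ tw ++ [d]) (acc ++ [String.ofList (tw ++ [d])]) hpre']
    simp

-- ===== VERDICT (by name: the statement is the Claim_ definition above) =====
theorem parse_string_to_chord_spec : Claim_equal_parse_string_to_chord := by
  intro s _
  unfold Spec_parse_string_to_chord parse_string_to_chord parse_string_to_chord_alt
  have h := pvMain s s.toList [] [] (by simp)
  simp only [List.length_nil, Nat.cast_zero, List.nil_append] at h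
  show (List.foldl (pvStepA s) ([], 0) (PySem.List.enumerate s.toList 0)).1 = _
  rw [h, ← pvPair_split s.toList, List.map_map]
  simp
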